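-- pv_equiv track=rewrite | github.com/augustin38/TP-INF101 | TP6-INF101.py | nb_voyelles
-- ===== SOURCE A (Python) =====
-- def nb_voyelles(mot):
--     v = ["a","e","i","o","u","y"]
--     nbv = 0
--     liste_lettres = mot.split() # marche pas
--     for e in liste_lettres:
--         if e in v:
--             nbv += 1
--     return nbv
-- ===== SOURCE B (Python) =====
-- def nb_voyelles(mot):
--     counts = {}
--     for tok in mot.split():
--         counts[tok] = counts.get(tok, 0) + 1
--     return sum(counts.get(v, 0) for v in ("a", "e", "i", "o", "u", "y"))
-- ===== Notes on version B (the rewrite author's own statement) =====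
-- stated objective: alternative
-- what changed: B tallies the whitespace tokens into a frequency dictionary in one pass and then sums the tallies of the six fixed vowels, inverting the traversal (loop over vowels, not over tokens with an inner membership test).
import Mathlib
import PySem

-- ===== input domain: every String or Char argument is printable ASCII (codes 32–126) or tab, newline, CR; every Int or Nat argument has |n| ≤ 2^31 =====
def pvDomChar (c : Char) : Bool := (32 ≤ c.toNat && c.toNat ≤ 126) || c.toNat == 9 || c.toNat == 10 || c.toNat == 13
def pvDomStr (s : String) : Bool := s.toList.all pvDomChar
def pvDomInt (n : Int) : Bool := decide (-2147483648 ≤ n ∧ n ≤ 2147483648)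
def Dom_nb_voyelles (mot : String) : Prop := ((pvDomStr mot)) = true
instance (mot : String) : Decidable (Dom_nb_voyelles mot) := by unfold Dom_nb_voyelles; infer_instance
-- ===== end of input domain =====

-- B tallies the whitespace tokens into a frequency dictionary once, then sums the tallies of the
-- six fixed vowels (loop over vowels) instead of testing each token against the vowel list.

-- ===== PORT A =====
def nb_voyelles (mot : String) : Int :=
  let v : List String := ["a", "e", "i", "o", "u", "y"]
  let liste_lettres := PySem.Str.split₀ mot
  liste_lettres.foldl (fun nbv e => if e ∈ v then nbv + 1 else nbv) 0

-- ===== PORT B =====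
def nb_voyelles_alt (mot : String) : Int :=
  let counts : PySem.Dict String Int :=
    (PySem.Str.split₀ mot).foldl (fun d tok => d.insert tok (d.getD tok 0 + 1)) PySem.Dict.empty
  (["a", "e", "i", "o", "u", "y"] : List String).foldl (fun s v => s + counts.getD v 0) 0

-- ===== PRECONDITION & SPEC =====
def Spec_nb_voyelles (mot : String) (out : Int) : Prop := out = nb_voyelles_alt mot
instance (mot : String) (out : Int) : Decidable (Spec_nb_voyelles mot out) := by unfold Spec_nb_voyelles; infer_instance

-- ===== CLAIM (what is proved, stated in full; the proofs are below) =====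
def Claim_equal_nb_voyelles : Prop := ∀ (mot : String), Dom_nb_voyelles mot → Spec_nb_voyelles mot (nb_voyelles mot)

-- ===== LEMMAS AND PROOFS =====

lemma foldl_vowel_count (toks : List String) (n : Int) :
    toks.foldl (fun nbv e => if e ∈ (["a", "e", "i", "o", "u", "y"] : List String) then nbv + 1 else nbv) n
      = n + toks.count "a" + toks.count "e" + toks.count "i" + toks.count "o"
          + toks.count "u" + toks.count "y" := by
  induction toks generalizing n with
  | nil => simp
  | cons t ts ih =>
    simp only [List.foldl_cons, ih, List.count_cons]
    by_cases h : t ∈ (["a", "e", "i", "o", "u", "y"] : List String)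
    · simp only [h, if_true]
      simp only [List.mem_cons, List.not_mem_nil, or_false] at h
      rcases h with rfl | rfl | rfl | rfl | rfl | rfl <;> simp <;> ring
    · simp only [h, if_false]
      simp only [List.mem_cons, List.not_mem_nil, or_false, not_or] at h
      obtain ⟨h1, h2, h3, h4, h5, h6⟩ := h
      simp [beq_iff_eq, h1, h2, h3, h4, h5, h6]

lemma alt_eq_counts (mot : String) :
    nb_voyelles_alt mot
      = 0 + ((PySem.Str.split₀ mot).count "a" : Int) + (PySem.Str.split₀ mot).count "e"
          + (PySem.Str.split₀ mot).count "i" + (PySem.Str.split₀ mot).count "o"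
          + (PySem.Str.split₀ mot).count "u" + (PySem.Str.split₀ mot).count "y" := by
  unfold nb_voyelles_alt
  simp only [PySem.Dict.foldl_insert_getD_add_one_eq_counter, List.foldl_cons, List.foldl_nil,
    PySem.Dict.getD_counter]

-- ===== VERDICT (by name: the statement is the Claim_ definition above) =====
theorem nb_voyelles_spec : Claim_equal_nb_voyelles := by
  intro mot _
  unfold Spec_nb_voyelles
  rw [alt_eq_counts]
  unfold nb_voyelles
  simp only [foldl_vowel_count]
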